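-- pv_equiv track=rewrite | github.com/SiverKing/SiverWXbot_plus | WxBot.py | new_msg_get_plus
-- ===== SOURCE A (Python) =====
-- def new_msg_get_plus(chat_records):
--     filtered = [msg for msg in chat_records if msg[0] not in ("SYS", "Recall")]
--     if any(msg[0] == "Self" for msg in filtered):
--         latest_self_index = None
--         for idx, msg in enumerate(filtered):
--             if msg[0] == "Self":
--                 latest_self_index = idx
--         post_self = filtered[latest_self_index + 1:]
--         latest_time_index = None
--         for idx, msg in enumerate(post_self):
--             if msg[0] == "Time":
--                 latest_time_index = idx
--         if latest_time_index is not None: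
--             post_time = post_self[latest_time_index + 1:]
--             final_records = [msg for msg in post_time if msg[0] not in ("Self", "Time")]
--             return final_records
--         else:
--             return post_self
--     else:
--         latest_time_index = None
--         for idx, msg in enumerate(filtered):
--             if msg[0] == "Time":
--                 latest_time_index = idx
--         if latest_time_index is not None:
--             post_time = filtered[latest_time_index + 1:]
--             final_records = [msg for msg in post_time if msg[0] not in ("Self", "Time")]
--             return final_records
--         else:
--             return filtered
-- ===== SOURCE B (Python) =====
-- def new_msg_get_plus(chat_records):
--     filtered = [msg for msg in chat_records if msg[0] not in ("SYS", "Recall")]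
--     cut = -1
--     for idx, msg in enumerate(filtered):
--         if msg[0] in ("Self", "Time"):
--             cut = idx
--     return filtered[cut + 1:]
-- ===== Notes on version B (the rewrite author's own statement) =====
-- stated objective: simpler
-- what changed: Replaces A's four-way branch (last-Self scan, then last-Time scan on the suffix, then a redundant Self/Time filter) by one forward scan recording the index of the last Self-or-Time marker and returning the suffix after it; A's trailing filter is provably a no-op.
import Mathlib
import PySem

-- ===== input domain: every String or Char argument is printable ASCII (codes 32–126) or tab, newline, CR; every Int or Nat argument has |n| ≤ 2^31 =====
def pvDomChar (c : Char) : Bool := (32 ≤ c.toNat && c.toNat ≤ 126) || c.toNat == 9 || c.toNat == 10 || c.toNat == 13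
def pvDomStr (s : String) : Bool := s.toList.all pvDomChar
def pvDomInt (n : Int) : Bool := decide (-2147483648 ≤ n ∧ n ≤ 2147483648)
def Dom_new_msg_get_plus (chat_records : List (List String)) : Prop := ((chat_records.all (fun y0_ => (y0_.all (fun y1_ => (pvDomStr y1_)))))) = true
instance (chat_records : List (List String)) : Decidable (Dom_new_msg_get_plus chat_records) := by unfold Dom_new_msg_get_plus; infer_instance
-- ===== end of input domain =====

-- B replaces A's four-way branch (last-Self scan, last-Time scan on the suffix, then a
-- redundant Self/Time filter) by one scan for the last Self-or-Time marker and a single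
-- suffix slice; objective: simpler.


-- ===== PORT A =====
def new_msg_get_plus (chat_records : List (List String)) : List (List String) :=
  let filtered := chat_records.filter fun msg =>
    !(PySem.List.pyGetD msg 0 "" == "SYS" || PySem.List.pyGetD msg 0 "" == "Recall")
  if filtered.any (fun msg => PySem.List.pyGetD msg 0 "" == "Self") then
    let latest_self_index : Option Int := (PySem.List.enumerate filtered).foldl
      (fun acc p => if PySem.List.pyGetD p.2 0 "" == "Self" then some p.1 else acc) none
    match latest_self_index with
    | none => []  -- unreachable: the any-guard above guarantees a Self message exists
    | some i =>
      let post_self := PySem.List.slice filtered (some (i + 1)) none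
      let latest_time_index : Option Int := (PySem.List.enumerate post_self).foldl
        (fun acc p => if PySem.List.pyGetD p.2 0 "" == "Time" then some p.1 else acc) none
      match latest_time_index with
      | some j =>
        let post_time := PySem.List.slice post_self (some (j + 1)) none
        post_time.filter fun msg =>
          !(PySem.List.pyGetD msg 0 "" == "Self" || PySem.List.pyGetD msg 0 "" == "Time")
      | none => post_self
  else
    let latest_time_index : Option Int := (PySem.List.enumerate filtered).foldl
      (fun acc p => if PySem.List.pyGetD p.2 0 "" == "Time" then some p.1 else acc) none
    match latest_time_index with
    | some j =>
      let post_time := PySem.List.slice filtered (some (j + 1)) none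
      post_time.filter fun msg =>
        !(PySem.List.pyGetD msg 0 "" == "Self" || PySem.List.pyGetD msg 0 "" == "Time")
    | none => filtered

-- ===== PORT B =====
def new_msg_get_plus_alt (chat_records : List (List String)) : List (List String) :=
  let filtered := chat_records.filter fun msg =>
    !(PySem.List.pyGetD msg 0 "" == "SYS" || PySem.List.pyGetD msg 0 "" == "Recall")
  let cut : Int := (PySem.List.enumerate filtered).foldl
    (fun acc p => if PySem.List.pyGetD p.2 0 "" == "Self" || PySem.List.pyGetD p.2 0 "" == "Time"
                  then p.1 else acc) (-1)
  PySem.List.slice filtered (some (cut + 1)) none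

-- ===== PRECONDITION & SPEC =====
-- Pre_ excludes chat records containing an empty message list, on which Python's msg[0] raises IndexError (in A and in B alike).
def Pre_new_msg_get_plus (chat_records : List (List String)) : Prop :=
  ∀ msg ∈ chat_records, msg ≠ []
instance (chat_records : List (List String)) : Decidable (Pre_new_msg_get_plus chat_records) := by unfold Pre_new_msg_get_plus; infer_instance
def pvWitness_new_msg_get_plus : List (List String) :=
  [["Self", "hi"], ["Time", "12:00"], ["Text", "yo"]]
def Spec_new_msg_get_plus (chat_records : List (List String)) (out : List (List String)) : Prop := out = new_msg_get_plus_alt chat_records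
instance (chat_records : List (List String)) (out : List (List String)) : Decidable (Spec_new_msg_get_plus chat_records out) := by unfold Spec_new_msg_get_plus; infer_instance

-- ===== CLAIM (what is proved, stated in full; the proofs are below) =====
def Claim_equal_new_msg_get_plus : Prop := ∀ (chat_records : List (List String)), Dom_new_msg_get_plus chat_records → Pre_new_msg_get_plus chat_records → Spec_new_msg_get_plus chat_records (new_msg_get_plus chat_records)

-- ===== LEMMAS AND PROOFS =====

-- head-of-message predicates
def pvSelf (m : List String) : Bool := PySem.List.pyGetD m 0 "" == "Self"
def pvTime (m : List String) : Bool := PySem.List.pyGetD m 0 "" == "Time"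
def pvMark (m : List String) : Bool := pvSelf m || pvTime m

-- A's "last index where P holds" loop
def pvLastIdx (P : List String → Bool) (l : List (List String)) : Option Int :=
  (PySem.List.enumerate l).foldl (fun acc p => if P p.2 then some p.1 else acc) none

-- B's cut loop
def pvCut (l : List (List String)) : Int :=
  (PySem.List.enumerate l).foldl (fun acc p => if pvMark p.2 then p.1 else acc) (-1)

-- bodies of the two ports applied to the already-filtered list (same match structure as the ports)
def pvCoreA (l : List (List String)) : List (List String) :=
  if l.any pvSelf then
    match pvLastIdx pvSelf l with
    | none => []
    | some i =>
      let post_self := PySem.List.slice l (some (i + 1)) none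
      match pvLastIdx pvTime post_self with
      | some j => (PySem.List.slice post_self (some (j + 1)) none).filter (fun m => !pvMark m)
      | none => post_self
  else
    match pvLastIdx pvTime l with
    | some j => (PySem.List.slice l (some (j + 1)) none).filter (fun m => !pvMark m)
    | none => l

def pvCoreB (l : List (List String)) : List (List String) :=
  PySem.List.slice l (some (pvCut l + 1)) none

theorem pvLastIdx_snoc (P : List String → Bool) (l : List (List String)) (m : List String) :
    pvLastIdx P (l ++ [m]) = if P m then some (l.length : Int) else pvLastIdx P l := by
  unfold pvLastIdx
  rw [PySem.List.enumerate_append, List.foldl_append]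
  simp [PySem.List.enumerate]

theorem pvCut_snoc (l : List (List String)) (m : List String) :
    pvCut (l ++ [m]) = if pvMark m then (l.length : Int) else pvCut l := by
  unfold pvCut
  rw [PySem.List.enumerate_append, List.foldl_append]
  simp [PySem.List.enumerate]

theorem pvLastIdx_bound (P : List String → Bool) (l : List (List String)) (i : Int)
    (h : pvLastIdx P l = some i) : 0 ≤ i ∧ i + 1 ≤ (l.length : Int) := by
  induction l using List.reverseRecOn with
  | nil => simp [pvLastIdx, PySem.List.enumerate] at h
  | append_singleton l m ih =>
    rw [pvLastIdx_snoc] at h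
    by_cases hm : P m
    · simp only [hm, if_true, Option.some.injEq] at h
      subst h
      constructor
      · positivity
      · simp only [List.length_append, List.length_cons, List.length_nil]
        push_cast
        omega
    · simp only [hm, Bool.false_eq_true, if_false] at h
      have := ih h
      simp only [List.length_append, List.length_cons, List.length_nil]
      push_cast
      omega

theorem pvLastIdx_none_iff (P : List String → Bool) (l : List (List String)) :
    pvLastIdx P l = none ↔ l.any P = false := by
  induction l using List.reverseRecOn with
  | nil => simp [pvLastIdx, PySem.List.enumerate]
  | append_singleton l m ih =>
    rw [pvLastIdx_snoc]
    by_cases hm : P m <;> simp [hm, ih]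

theorem pvCut_bound (l : List (List String)) :
    -1 ≤ pvCut l ∧ pvCut l + 1 ≤ (l.length : Int) := by
  induction l using List.reverseRecOn with
  | nil => simp [pvCut, PySem.List.enumerate]
  | append_singleton l m ih =>
    rw [pvCut_snoc]
    by_cases hm : pvMark m
    · simp only [hm, if_true, List.length_append, List.length_cons, List.length_nil]
      push_cast
      omega
    · simp only [hm, Bool.false_eq_true, if_false, List.length_append, List.length_cons,
        List.length_nil]
      push_cast
      omega

-- slicing from a valid nonnegative start distributes over a trailing singleton
theorem pvSlice_snoc (l : List (List String)) (m : List String) (i : Int)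
    (h0 : 0 ≤ i) (h1 : i ≤ (l.length : Int)) :
    PySem.List.slice (l ++ [m]) (some i) none = PySem.List.slice l (some i) none ++ [m] := by
  rw [PySem.List.slice_from (xs := l ++ [m]) h0, PySem.List.slice_from (xs := l) h0]
  rw [List.drop_append_of_le_length (by omega)]

theorem pvSlice_all (l : List (List String)) (m : List String) :
    PySem.List.slice (l ++ [m]) (some ((l.length : Int) + 1)) none = [] := by
  rw [PySem.List.slice_from (xs := l ++ [m]) (by positivity)]
  apply List.drop_eq_nil_of_le
  simp

theorem pvCoreB_snoc (l : List (List String)) (m : List String) :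
    pvCoreB (l ++ [m]) = if pvMark m then [] else pvCoreB l ++ [m] := by
  unfold pvCoreB
  rw [pvCut_snoc]
  by_cases hm : pvMark m
  · simp only [hm, if_true]
    exact pvSlice_all l m
  · simp only [hm, Bool.false_eq_true, if_false]
    have hb := pvCut_bound l
    exact pvSlice_snoc l m _ (by omega) (by omega)

theorem pvCoreA_snoc (l : List (List String)) (m : List String) :
    pvCoreA (l ++ [m]) = if pvMark m then [] else pvCoreA l ++ [m] := by
  by_cases hself : pvSelf m
  · -- m is a Self message: every branch collapses to []
    have hmark : pvMark m = true := by simp [pvMark, hself]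
    have hany : (l ++ [m]).any pvSelf = true := by simp [hself]
    unfold pvCoreA
    rw [pvLastIdx_snoc]
    simp only [hany, if_true, pvLastIdx_snoc, hself, hmark, if_true]
    rw [pvSlice_all]
    simp [pvLastIdx, PySem.List.enumerate]
  · have hs : pvSelf m = false := by simpa using hself
    by_cases htime : pvTime m
    · -- m is a Time message (not Self)
      have hmark : pvMark m = true := by simp [pvMark, htime]
      unfold pvCoreA
      simp only [hmark, if_true]
      rw [pvLastIdx_snoc]
      simp only [hs, Bool.false_eq_true, if_false]
      by_cases hany : l.any pvSelf
      · have hany' : (l ++ [m]).any pvSelf = true := by simp [hany]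
        simp only [hany', if_true]
        obtain ⟨i, hi⟩ : ∃ i, pvLastIdx pvSelf l = some i := by
          cases h : pvLastIdx pvSelf l with
          | none => rw [pvLastIdx_none_iff] at h; simp [hany] at h
          | some i => exact ⟨i, rfl⟩
        have hb := pvLastIdx_bound _ _ _ hi
        simp only [hi]
        rw [pvSlice_snoc l m (i + 1) (by omega) (by omega)]
        rw [pvLastIdx_snoc]
        simp only [htime, if_true]
        rw [pvSlice_all]
        simp
      · have hany' : (l ++ [m]).any pvSelf = false := by
          simp only [List.any_append, Bool.or_eq_false_iff]
          exact ⟨by simpa using hany, by simp [hs]⟩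
        simp only [hany', Bool.false_eq_true, if_false]
        rw [pvLastIdx_snoc]
        simp only [htime, if_true]
        rw [pvSlice_all]
        simp
    · -- m is neither Self nor Time
      have ht : pvTime m = false := by simpa using htime
      have hmark : pvMark m = false := by simp [pvMark, hs, ht]
      unfold pvCoreA
      simp only [hmark, Bool.false_eq_true, if_false]
      rw [pvLastIdx_snoc]
      simp only [hs, Bool.false_eq_true, if_false]
      by_cases hany : l.any pvSelf
      · have hany' : (l ++ [m]).any pvSelf = true := by simp [hany]
        simp only [hany, hany', if_true]
        obtain ⟨i, hi⟩ : ∃ i, pvLastIdx pvSelf l = some i := by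
          cases h : pvLastIdx pvSelf l with
          | none => rw [pvLastIdx_none_iff] at h; simp [hany] at h
          | some i => exact ⟨i, rfl⟩
        have hb := pvLastIdx_bound _ _ _ hi
        simp only [hi]
        rw [pvSlice_snoc l m (i + 1) (by omega) (by omega)]
        rw [pvLastIdx_snoc]
        simp only [ht, Bool.false_eq_true, if_false]
        cases hj : pvLastIdx pvTime (PySem.List.slice l (some (i + 1)) none) with
        | none => simp only []
        | some j =>
          have hjb := pvLastIdx_bound _ _ _ hj
          simp only []
          rw [pvSlice_snoc _ m (j + 1) (by omega) (by omega)]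
          rw [List.filter_append]
          simp [hmark]
      · have hany' : (l ++ [m]).any pvSelf = false := by
          simp only [List.any_append, Bool.or_eq_false_iff]
          exact ⟨by simpa using hany, by simp [hs]⟩
        have hanyf : l.any pvSelf = false := by simpa using hany
        simp only [hanyf, hany', Bool.false_eq_true, if_false]
        rw [pvLastIdx_snoc]
        simp only [ht, Bool.false_eq_true, if_false]
        cases hj : pvLastIdx pvTime l with
        | none => simp only []
        | some j =>
          have hjb := pvLastIdx_bound _ _ _ hj
          simp only []
          rw [pvSlice_snoc l m (j + 1) (by omega) (by omega)]
          rw [List.filter_append]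
          simp [hmark]

theorem pvCore_eq (l : List (List String)) : pvCoreA l = pvCoreB l := by
  induction l using List.reverseRecOn with
  | nil => rfl
  | append_singleton l m ih =>
    rw [pvCoreA_snoc, pvCoreB_snoc, ih]

-- ===== VERDICT (by name: the statement is the Claim_ definition above) =====
theorem new_msg_get_plus_spec : Claim_equal_new_msg_get_plus := by
  intro cr _ _
  unfold Spec_new_msg_get_plus
  show new_msg_get_plus cr = new_msg_get_plus_alt cr
  have hA : new_msg_get_plus cr = pvCoreA (cr.filter fun msg =>
      !(PySem.List.pyGetD msg 0 "" == "SYS" || PySem.List.pyGetD msg 0 "" == "Recall")) := rfl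
  have hB : new_msg_get_plus_alt cr = pvCoreB (cr.filter fun msg =>
      !(PySem.List.pyGetD msg 0 "" == "SYS" || PySem.List.pyGetD msg 0 "" == "Recall")) := rfl
  rw [hA, hB, pvCore_eq]
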